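-- pv_equiv track=rewrite | github.com/Kibachok/sovarchdb | tools.py | get_user_permission
-- ===== SOURCE A (Python) =====
-- PERM_LIST = ('insight', 'generate_keys', 'moderate_data', 'add_data', 'moderate_media', 'add_media', 'moderate_forum',
--              'use_forum')  # per-bit mask 'decoder' keywords:
--
-- def get_user_permission(mask):
--     mask = mask & 255
--     perms = dict()
--     for _ in range(8):
--         val = mask // (128 // (2 ** _))
--         mask = mask % (128 // (2 ** _))
--         perms[PERM_LIST[_]] = bool(val)
--     return perms
-- ===== SOURCE B (Python) =====
-- PERM_LIST = ('insight', 'generate_keys', 'moderate_data', 'add_data', 'moderate_media', 'add_media', 'moderate_forum',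
--              'use_forum')
--
-- def get_user_permission(mask):
--     bits = format(mask & 255, '08b')
--     return {name: ch == '1' for name, ch in zip(PERM_LIST, bits)}
-- ===== Notes on version B (the rewrite author's own statement) =====
-- stated objective: idiomatic
-- what changed: Replaces the mutating divide/mod bit-extraction loop over a dict with a stateless comprehension zipping PERM_LIST against the precomputed 8-bit binary string format(mask & 255, '08b').
import Mathlib
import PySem

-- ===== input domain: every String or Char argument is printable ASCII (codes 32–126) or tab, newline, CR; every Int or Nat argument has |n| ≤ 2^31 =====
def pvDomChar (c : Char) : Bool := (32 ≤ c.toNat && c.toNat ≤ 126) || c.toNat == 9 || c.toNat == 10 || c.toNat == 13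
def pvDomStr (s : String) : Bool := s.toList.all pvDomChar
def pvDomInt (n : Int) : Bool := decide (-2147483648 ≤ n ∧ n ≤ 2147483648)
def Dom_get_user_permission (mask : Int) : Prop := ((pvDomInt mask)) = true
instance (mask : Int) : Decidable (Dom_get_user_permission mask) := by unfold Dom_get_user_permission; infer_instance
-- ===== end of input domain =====

-- B replaces A's mutating divide/mod bit-extraction loop by zipping PERM_LIST with the
-- precomputed 8-bit binary string of mask & 255 (objective: idiomatic; return value identical).

-- ===== PORT A =====
def pvPermList : List String :=
  ["insight", "generate_keys", "moderate_data", "add_data", "moderate_media", "add_media",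
   "moderate_forum", "use_forum"]

-- the for-loop over range(8), state = (mask, perms); bool(val) is (val != 0)
def pvLoopA (m0 : Int) : PySem.Dict String Bool :=
  ((PySem.List.pyRange 0 8 1).foldl
    (fun (st : Int × PySem.Dict String Bool) i =>
      let val := PySem.Int.floordiv st.1 (PySem.Int.floordiv 128 ((2:Int) ^ i.toNat))
      let m' := PySem.Int.mod st.1 (PySem.Int.floordiv 128 ((2:Int) ^ i.toNat))
      (m', st.2.insert (PySem.List.pyGetD pvPermList i "") (!(val == 0))))
    (m0, PySem.Dict.empty)).2

def get_user_permission (mask : Int) : List (String × Bool) :=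
  (pvLoopA (PySem.Int.band mask 255)).items

-- ===== PORT B =====
-- format(n, '08b') for 0 ≤ n < 256: the 8 binary digits, most significant first
def pvBin8 (n : Int) : List Char :=
  (List.range 8).map (fun i => if (n.toNat >>> (7 - i)) % 2 == 1 then '1' else '0')

def get_user_permission_alt (mask : Int) : List (String × Bool) :=
  let bits := pvBin8 (PySem.Int.band mask 255)
  (PySem.Dict.ofList ((pvPermList.zip bits).map (fun p => (p.1, p.2 == '1')))).items

-- ===== PRECONDITION & SPEC =====
def Spec_get_user_permission (mask : Int) (out : List (String × Bool)) : Prop := out = get_user_permission_alt mask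
instance (mask : Int) (out : List (String × Bool)) : Decidable (Spec_get_user_permission mask out) := by unfold Spec_get_user_permission; infer_instance

-- ===== CLAIM (what is proved, stated in full; the proofs are below) =====
def Claim_equal_get_user_permission : Prop := ∀ (mask : Int), Dom_get_user_permission mask → Spec_get_user_permission mask (get_user_permission mask)

-- ===== LEMMAS AND PROOFS =====
lemma pv_band255_nonneg (a : Int) : 0 ≤ PySem.Int.band a 255 := by
  rw [PySem.Int.band_comm]
  exact PySem.Int.band_nonneg_of_nonneg_left a (by norm_num)

lemma pv_band255_lt (a : Int) : PySem.Int.band a 255 < 256 := by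
  unfold PySem.Int.band
  norm_num
  split_ifs with h1
  · have : a.toNat &&& (255:Int).toNat < 2 ^ 8 := Nat.and_lt_two_pow a.toNat (by norm_num)
    omega
  · have := Nat.sub_le (255:Int).toNat ((255:Int).toNat &&& (-a - 1).toNat)
    omega

set_option maxRecDepth 4096 in
lemma pv_key : ∀ (k : Fin 256),
    (pvLoopA (k.val : Int)).items =
      (PySem.Dict.ofList ((pvPermList.zip (pvBin8 (k.val : Int))).map
        (fun p => (p.1, p.2 == '1')))).items := by
  decide

-- ===== VERDICT (by name: the statement is the Claim_ definition above) =====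
theorem get_user_permission_spec : Claim_equal_get_user_permission := by
  intro mask _
  unfold Spec_get_user_permission get_user_permission get_user_permission_alt
  have h1 := pv_band255_nonneg mask
  have h2 := pv_band255_lt mask
  set n := PySem.Int.band mask 255 with hn
  have hk : n = (((⟨n.toNat, by omega⟩ : Fin 256)).val : Int) := by simp; omega
  rw [hk, pv_key]
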